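-- pv_equiv track=rewrite | github.com/FCP-INDI/C-PAC | CPAC/utils/docs.py | outdent_lines
-- ===== SOURCE A (Python) =====
-- def outdent_lines(docstring: str, spaces: int = 4) -> str:
--     """Outdent lines in a string by specified number of spaces.
--
--     Only outdents lines that are at least that indented.
--     Useful for combining docstrings.
--
--     Examples
--     --------
--     >>> import re
--     >>> re.findall(r'^    Only.*$', outdent_lines.__doc__, flags=re.MULTILINE)
--     ['    Only outdents lines that are at least that indented.']
--     >>> re.findall(r'^Only.*$', outdent_lines.__doc__, flags=re.MULTILINE)
--     []
--     >>> re.findall(r'^    Only.*$', outdent_lines(outdent_lines.__doc__),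
--     ...     flags=re.MULTILINE)
--     []
--     >>> re.findall(r'^Only.*$', outdent_lines(outdent_lines.__doc__),
--     ...     flags=re.MULTILINE)
--     ['Only outdents lines that are at least that indented.']
--     >>> re.findall(r'^ Only.*$', outdent_lines(outdent_lines.__doc__, 3),
--     ...     flags=re.MULTILINE)
--     [' Only outdents lines that are at least that indented.']
--     """
--     new_docstring = []
--     for line in docstring.split("\n"):
--         if line.startswith(" " * spaces):
--             new_docstring.append(line[spaces:])
--         else:
--             new_docstring.append(line)
--     return "\n".join(new_docstring)
-- ===== SOURCE B (Python) =====
-- def outdent_lines(docstring: str, spaces: int = 4) -> str: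
--     """Outdent lines in a string by specified number of spaces.
--
--     Only outdents lines that are at least that indented.
--     """
--     prefix = " " * spaces
--     return docstring.removeprefix(prefix).replace("\n" + prefix, "\n")
-- ===== Notes on version B (the rewrite author's own statement) =====
-- stated objective: idiomatic
-- what changed: Replaces the split/loop/join over lines with a single removeprefix for the first line plus one str.replace of newline-plus-prefix by newline for all other lines; no explicit iteration over lines.
-- intended difference: For negative spaces with some line longer than |spaces|, A's space prefix is empty so every line starts with it and line[spaces:] keeps only the last |spaces| characters of each longer line, truncating the text; B leaves the string unchanged, which is the intended no-op for a non-positive outdent. — e.g. on outdent_lines("ab", -1): A returns "b", B returns "ab"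
import Mathlib
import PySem

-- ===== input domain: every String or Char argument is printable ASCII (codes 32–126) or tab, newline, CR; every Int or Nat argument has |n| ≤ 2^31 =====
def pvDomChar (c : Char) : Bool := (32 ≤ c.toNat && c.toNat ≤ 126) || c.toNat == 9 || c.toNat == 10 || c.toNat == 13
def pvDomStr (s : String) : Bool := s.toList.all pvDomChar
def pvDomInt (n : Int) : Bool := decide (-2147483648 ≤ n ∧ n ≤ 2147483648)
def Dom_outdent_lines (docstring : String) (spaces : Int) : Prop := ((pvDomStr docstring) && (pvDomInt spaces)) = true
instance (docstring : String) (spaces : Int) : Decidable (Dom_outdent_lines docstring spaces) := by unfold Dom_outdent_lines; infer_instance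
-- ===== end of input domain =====

-- B replaces A's split/loop/join over lines by one removeprefix plus one str.replace of newline-plus-prefix by newline; on negative `spaces` A truncates long lines while B leaves the string unchanged (see D_ below).


-- ===== PORT A =====
def outdent_lines (docstring : String) (spaces : Int) : String :=
  -- " " * spaces  (empty for spaces ≤ 0) — exact
  let pref : List Char := List.replicate spaces.toNat ' '
  let lines := PySem.Chars.splitOn docstring.toList ['\n']
  let newDocstring : List (List Char) := lines.foldl (fun acc line =>
      if PySem.Chars.startswith line pref
      then acc ++ [PySem.Chars.slice line (some spaces) none]   -- line[spaces:]
      else acc ++ [line]) []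
  String.ofList (PySem.Chars.join ['\n'] newDocstring)

-- ===== PORT B =====
def outdent_lines_alt (docstring : String) (spaces : Int) : String :=
  let prefx : List Char := List.replicate spaces.toNat ' '      -- " " * spaces — exact
  let cs := docstring.toList
  -- str.removeprefix: drop the prefix iff present — exact (no PySem primitive covers it)
  let cs' := if PySem.Chars.startswith cs prefx then cs.drop prefx.length else cs
  String.ofList (PySem.Chars.replace cs' ('\n' :: prefx) ['\n'])

-- ===== PRECONDITION & SPEC =====
-- For spaces < 0 on a docstring with some line longer than |spaces| characters, A's prefix of
-- spaces is empty so every line starts with it and line[spaces:] keeps only the last |spaces|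
-- characters of each longer line (negative-slice truncation); B returns the docstring unchanged,
-- the intended no-op for a non-positive outdent.
def D_outdent_lines (docstring : String) (spaces : Int) : Prop :=
  spaces < 0 ∧ ∃ line ∈ PySem.Chars.splitOn docstring.toList ['\n'], -spaces < (line.length : Int)
instance (docstring : String) (spaces : Int) : Decidable (D_outdent_lines docstring spaces) := by
  unfold D_outdent_lines; infer_instance

def Spec_outdent_lines (docstring : String) (spaces : Int) (out : String) : Prop :=
  ¬ D_outdent_lines docstring spaces → out = outdent_lines_alt docstring spaces
instance (docstring : String) (spaces : Int) (out : String) : Decidable (Spec_outdent_lines docstring spaces out) := by unfold Spec_outdent_lines; infer_instance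

def pvDiffWitness_outdent_lines : String × Int := ("ab", -1)
def pvDiffWitnessOut_outdent_lines : String × String := ("b", "ab")

-- ===== CLAIM (what is proved, stated in full; the proofs are below) =====
def Claim_unchanged_outdent_lines : Prop := ∀ (docstring : String) (spaces : Int), Dom_outdent_lines docstring spaces → Spec_outdent_lines docstring spaces (outdent_lines docstring spaces)
def Claim_changed_outdent_lines : Prop := Dom_outdent_lines (pvDiffWitness_outdent_lines.1) (pvDiffWitness_outdent_lines.2) ∧ D_outdent_lines (pvDiffWitness_outdent_lines.1) (pvDiffWitness_outdent_lines.2) ∧ outdent_lines (pvDiffWitness_outdent_lines.1) (pvDiffWitness_outdent_lines.2) = pvDiffWitnessOut_outdent_lines.1 ∧ outdent_lines_alt (pvDiffWitness_outdent_lines.1) (pvDiffWitness_outdent_lines.2) = pvDiffWitnessOut_outdent_lines.2 ∧ pvDiffWitnessOut_outdent_lines.1 ≠ pvDiffWitnessOut_outdent_lines.2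
def Claim_exact_outdent_lines : Prop := ∀ (docstring : String) (spaces : Int), Dom_outdent_lines docstring spaces → D_outdent_lines docstring spaces → outdent_lines docstring spaces ≠ outdent_lines_alt docstring spaces

-- ===== LEMMAS AND PROOFS =====


def splitNl : List Char → List (List Char)
  | [] => [[]]
  | c :: t =>
    if c = '\n' then [] :: splitNl t
    else
      match splitNl t with
      | [] => [[c]]
      | p :: ps => (c :: p) :: ps

theorem splitNl_ne_nil (cs : List Char) : splitNl cs ≠ [] := by
  cases cs with
  | nil => simp [splitNl]
  | cons c t =>
    simp only [splitNl]
    split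
    · simp
    · split <;> simp

theorem go_spec : ∀ (fuel : Nat) (l cur : List Char) (acc : List (List Char)),
    l.length + 1 ≤ fuel →
    PySem.Chars.splitOn.go ['\n'] fuel l cur acc =
      acc.reverse ++ (match splitNl l with
        | [] => []
        | p :: ps => (cur.reverse ++ p) :: ps) := by
  intro fuel
  induction fuel with
  | zero => intro l cur acc h; omega
  | succ f ih =>
    intro l cur acc h
    cases l with
    | nil => simp [PySem.Chars.splitOn.go, splitNl]
    | cons c t =>
      simp only [PySem.Chars.splitOn.go]
      by_cases hc : c = '\n'
      · subst hc
        rw [if_pos (by simp [List.isPrefixOf])]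
        simp only [List.length_cons, List.length_nil, List.drop_succ_cons, List.drop_zero]
        rw [ih t [] (cur.reverse :: acc) (by simp at h ⊢; omega)]
        simp only [splitNl]
        cases hs : splitNl t with
        | nil => exact absurd hs (splitNl_ne_nil t)
        | cons p ps => simp
      · rw [if_neg (by simp [List.isPrefixOf]; exact fun h => hc h.symm)]
        rw [ih t (c :: cur) acc (by simp at h ⊢; omega)]
        simp only [splitNl, if_neg hc]
        cases hs : splitNl t with
        | nil => exact absurd hs (splitNl_ne_nil t)
        | cons p ps => simp

theorem splitOn_eq_splitNl (cs : List Char) :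
    PySem.Chars.splitOn cs ['\n'] = splitNl cs := by
  rw [PySem.Chars.splitOn, go_spec (cs.length + 1) cs [] [] (by omega)]
  cases hs : splitNl cs with
  | nil => exact absurd hs (splitNl_ne_nil cs)
  | cons p ps => simp

def rep (n : Nat) : List Char → List Char
  | [] => []
  | c :: t =>
    if ('\n' :: List.replicate n ' ') <+: (c :: t) then '\n' :: rep n (t.drop n)
    else c :: rep n t
termination_by l => l.length
decreasing_by all_goals simp

theorem replace_go_spec (n : Nat) : ∀ (fuel : Nat) (l : List Char) (acc : List Char),
    l.length ≤ fuel →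
    PySem.Chars.replace.go ('\n' :: List.replicate n ' ') ['\n'] fuel l acc =
      acc.reverse ++ rep n l := by
  intro fuel
  induction fuel with
  | zero =>
    intro l acc h
    have : l = [] := List.eq_nil_of_length_eq_zero (by omega)
    subst this
    simp [PySem.Chars.replace.go, rep]
  | succ f ih =>
    intro l acc h
    cases l with
    | nil => simp [PySem.Chars.replace.go, rep]
    | cons c t =>
      simp only [PySem.Chars.replace.go]
      by_cases hp : ('\n' :: List.replicate n ' ') <+: (c :: t)
      · rw [if_pos (List.isPrefixOf_iff_prefix.mpr hp)]
        rw [show List.drop ('\n' :: List.replicate n ' ').length (c :: t) = t.drop n by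
          simp]
        rw [ih (t.drop n) (['\n'].reverse ++ acc) (by simp at h ⊢; omega)]
        rw [rep, if_pos hp]
        simp
      · rw [if_neg (fun h => hp (List.isPrefixOf_iff_prefix.mp h))]
        rw [ih t (c :: acc) (by simp at h ⊢; omega)]
        rw [rep, if_neg hp]
        simp

theorem replace_eq_rep (n : Nat) (cs : List Char) :
    PySem.Chars.replace cs ('\n' :: List.replicate n ' ') ['\n'] = rep n cs := by
  rw [PySem.Chars.replace]
  simp only [List.isEmpty_cons]
  exact replace_go_spec n cs.length cs [] (le_refl _)

def fLine (n : Nat) (l : List Char) : List Char :=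
  if List.replicate n ' ' <+: l then l.drop n else l

theorem joinNl_cons (l0 : List Char) (ls : List (List Char)) :
    PySem.Chars.join ['\n'] (l0 :: ls) = l0 ++ (ls.map (fun l => '\n' :: l)).flatten := by
  induction ls generalizing l0 with
  | nil => simp [PySem.Chars.join, List.intercalate]
  | cons m ms ih =>
    rw [show PySem.Chars.join ['\n'] (l0 :: m :: ms) = l0 ++ '\n' :: PySem.Chars.join ['\n'] (m :: ms) from by
      simp [PySem.Chars.join, List.intercalate, List.intersperse]]
    rw [ih]
    simp

theorem splitNl_head_prefix (t : List Char) (m0 : List Char) (ms : List (List Char))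
    (h : splitNl t = m0 :: ms) : m0 <+: t := by
  induction t generalizing m0 ms with
  | nil => simp [splitNl] at h; simp [h.1]
  | cons c t ih =>
    simp only [splitNl] at h
    by_cases hc : c = '\n'
    · rw [if_pos hc] at h
      injection h with h1 h2
      subst h1
      simp
    · rw [if_neg hc] at h
      cases hs : splitNl t with
      | nil => exact absurd hs (splitNl_ne_nil t)
      | cons p ps =>
        rw [hs] at h
        injection h with h1 h2
        subst h1
        exact List.cons_prefix_cons.mpr ⟨rfl, ih p ps hs⟩

theorem splitNl_append_nonl (q u : List Char) (hq : ∀ c ∈ q, c ≠ '\n') :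
    splitNl (q ++ u) = (q ++ (splitNl u).headI) :: (splitNl u).tail := by
  induction q with
  | nil =>
    simp only [List.nil_append]
    cases hs : splitNl u with
    | nil => exact absurd hs (splitNl_ne_nil u)
    | cons p ps => simp
  | cons c q ih =>
    have hc : c ≠ '\n' := hq c (by simp)
    simp only [List.cons_append, splitNl, if_neg hc]
    rw [ih (fun d hd => hq d (by simp [hd]))]

theorem rep_main (n : Nat) (cs : List Char) : ∀ (l0 : List Char) (ls : List (List Char)),
    splitNl cs = l0 :: ls →
    rep n cs = l0 ++ (ls.map (fun l => '\n' :: fLine n l)).flatten := by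
  induction cs using rep.induct n with
  | case1 =>
    intro l0 ls h
    simp [splitNl] at h
    obtain ⟨rfl, rfl⟩ := h
    simp [rep]
  | case2 c t hp ih =>
    -- ('\n' :: replicate n ' ') <+: (c :: t), so c = '\n' and replicate n ' ' <+: t
    intro l0 ls h
    obtain ⟨hc, hpt⟩ := List.cons_prefix_cons.mp hp
    subst hc
    obtain ⟨t', rfl⟩ := hpt
    simp only [splitNl] at h
    rw [splitNl_append_nonl _ t' (by simp)] at h
    injection h with h1 h2
    subst h1
    cases hs : splitNl t' with
    | nil => exact absurd hs (splitNl_ne_nil t')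
    | cons p ps =>
      rw [rep, if_pos hp]
      rw [show (List.replicate n ' ' ++ t').drop n = t' from by simp] at ih ⊢
      rw [ih p ps hs]
      subst h2
      simp [hs, fLine, List.prefix_append]
  | case3 c t hp ih =>
    intro l0 ls h
    by_cases hc : c = '\n'
    · subst hc
      simp only [splitNl] at h
      injection h with h1 h2
      subst h1
      cases hs : splitNl t with
      | nil => exact absurd hs (splitNl_ne_nil t)
      | cons p ps =>
        rw [rep, if_neg hp]
        rw [ih p ps hs]
        subst h2
        have hnp : ¬ (List.replicate n ' ' <+: p) := by
          intro hpp
          exact hp (List.cons_prefix_cons.mpr ⟨rfl, hpp.trans (splitNl_head_prefix t p ps hs)⟩)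
      

        simp [hs, fLine, hnp]
    · simp only [splitNl, if_neg hc] at h
      cases hs : splitNl t with
      | nil => exact absurd hs (splitNl_ne_nil t)
      | cons p ps =>
        rw [hs] at h
        injection h with h1 h2
        subst h1 
        rw [rep, if_neg hp, ih p ps hs]
        subst h2
        simp

theorem a_toForm (docstring : String) (spaces : Int) :
    outdent_lines docstring spaces =
      String.ofList (PySem.Chars.join ['\n']
        ((splitNl docstring.toList).map (fun l =>
          if PySem.Chars.startswith l (List.replicate spaces.toNat ' ')
          then PySem.Chars.slice l (some spaces) none else l))) := by
  unfold outdent_lines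
  dsimp only
  rw [splitOn_eq_splitNl]
  rw [show (fun (acc : List (List Char)) (line : List Char) =>
      if PySem.Chars.startswith line (List.replicate spaces.toNat ' ')
      then acc ++ [PySem.Chars.slice line (some spaces) none]
      else acc ++ [line]) = (fun acc line => acc ++ [if PySem.Chars.startswith line (List.replicate spaces.toNat ' ')
      then PySem.Chars.slice line (some spaces) none else line]) from by
    funext a l; split <;> rfl]
  rw [PySem.List.foldl_append_singleton_eq_map]
  simp

theorem b_char (n : Nat) (cs : List Char) :
    rep n (if PySem.Chars.startswith cs (List.replicate n ' ')
           then cs.drop (List.replicate n ' ').length else cs) =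
      PySem.Chars.join ['\n'] ((splitNl cs).map (fLine n)) := by
  by_cases hp : List.replicate n ' ' <+: cs
  · rw [if_pos ((PySem.Chars.startswith_iff _ _).mpr hp)]
    obtain ⟨u, rfl⟩ := hp
    rw [show (List.replicate n ' ' ++ u).drop (List.replicate n ' ').length = u from by simp]
    cases hs : splitNl u with
    | nil => exact absurd hs (splitNl_ne_nil u)
    | cons p ps =>
      rw [rep_main n u p ps hs, splitNl_append_nonl _ u (by simp)]
      rw [hs]
      simp only [List.headI, List.tail, List.map_cons]
      rw [joinNl_cons]
      rw [show fLine n (List.replicate n ' ' ++ p) = p from by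
        simp [fLine, List.prefix_append]]
      simp [List.map_map, Function.comp_def]
  · rw [if_neg (by simpa [PySem.Chars.startswith_iff _ _] using hp)]
    cases hs : splitNl cs with
    | nil => exact absurd hs (splitNl_ne_nil cs)
    | cons p ps =>
      rw [rep_main n cs p ps hs, List.map_cons, joinNl_cons]
      rw [show fLine n p = p from by
        simp only [fLine]
        rw [if_neg (fun hpp => hp (hpp.trans (splitNl_head_prefix cs p ps hs)))]]
      simp [List.map_map, Function.comp_def]

theorem alt_toForm (docstring : String) (spaces : Int) :
    outdent_lines_alt docstring spaces =
      String.ofList (PySem.Chars.join ['\n']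
        ((splitNl docstring.toList).map (fLine spaces.toNat))) := by
  unfold outdent_lines_alt
  dsimp only
  rw [replace_eq_rep, b_char]

-- slice l (some spaces) none = drop for the two spec regimes
theorem slice_line_nonneg (l : List Char) (spaces : Int) (h : 0 ≤ spaces) :
    PySem.Chars.slice l (some spaces) none = l.drop spaces.toNat := by
  rw [PySem.Chars.slice_eq_listSlice, PySem.List.slice_from l h]

theorem slice_line_neg_short (l : List Char) (spaces : Int) (h : spaces < 0)
    (hl : (l.length : Int) ≤ -spaces) :
    PySem.Chars.slice l (some spaces) none = l := by
  rw [PySem.Chars.slice_eq_listSlice, PySem.List.slice_some_none]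
  rw [show spaces = -(((-spaces).toNat : Nat) : Int) from by omega]
  rw [PySem.List.clampIdx_neg_natCast _ _ (by omega)]
  rw [show l.length - (-spaces).toNat = 0 from by omega]
  simp

theorem unchanged_main (docstring : String) (spaces : Int) (hnD : ¬ D_outdent_lines docstring spaces) :
    outdent_lines docstring spaces = outdent_lines_alt docstring spaces := by
  rw [a_toForm, alt_toForm]
  congr 2
  apply List.map_congr_left
  intro l hl
  by_cases hsp : 0 ≤ spaces
  · simp only [fLine]
    by_cases hpre : List.replicate spaces.toNat ' ' <+: l
    · rw [if_pos ((PySem.Chars.startswith_iff _ _).mpr hpre), if_pos hpre,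
        slice_line_nonneg l spaces hsp]
    · rw [if_neg (fun hb => hpre ((PySem.Chars.startswith_iff _ _).mp hb)), if_neg hpre]
  · have hneg : spaces < 0 := by omega
    have hz : spaces.toNat = 0 := by omega
    have hshort : (l.length : Int) ≤ -spaces := by
      by_contra hlong
      exact hnD ⟨hneg, l, by rwa [splitOn_eq_splitNl], by omega⟩
    rw [hz]
    simp only [List.replicate_zero, fLine]
    rw [if_pos ((PySem.Chars.startswith_iff _ _).mpr (List.nil_prefix)),
        if_pos List.nil_prefix]
    rw [slice_line_neg_short l spaces hneg hshort]
    simp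

theorem join_length (l0 : List Char) (ls : List (List Char)) :
    (PySem.Chars.join ['\n'] (l0 :: ls)).length = l0.length + (ls.map (fun l => l.length + 1)).sum := by
  rw [joinNl_cons]
  simp [List.length_flatten, List.map_map, Function.comp_def, Nat.add_comm]

theorem tight_main (docstring : String) (spaces : Int) (hD : D_outdent_lines docstring spaces) :
    outdent_lines docstring spaces ≠ outdent_lines_alt docstring spaces := by
  obtain ⟨hneg, w, hw, hwlen⟩ := hD
  obtain ⟨k, hk, rfl⟩ : ∃ k : Nat, 0 < k ∧ spaces = -(k : Int) :=
    ⟨(-spaces).toNat, by omega, by omega⟩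
  rw [splitOn_eq_splitNl] at hw
  have hz : (-(k : Int)).toNat = 0 := by omega
  rw [a_toForm, alt_toForm]
  have hid : (splitNl docstring.toList).map (fLine (-(k : Int)).toNat) = splitNl docstring.toList := by
    rw [show fLine (-(k : Int)).toNat = id from funext fun l => by simp [fLine, hz]]
    exact List.map_id _
  have hmapA : (splitNl docstring.toList).map
      (fun l => if PySem.Chars.startswith l (List.replicate (-(k : Int)).toNat ' ')
                then PySem.Chars.slice l (some (-(k : Int))) none else l) =
      (splitNl docstring.toList).map (fun l => l.drop (l.length - k)) := by
    apply List.map_congr_left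
    intro l _
    rw [if_pos ((PySem.Chars.startswith_iff _ _).mpr (by simp [hz]))]
    rw [PySem.Chars.slice_eq_listSlice, PySem.List.slice_some_none,
      PySem.List.clampIdx_neg_natCast _ _ hk]
  rw [hmapA, hid]
  intro h
  have h' := congrArg String.toList h
  simp only [String.toList_ofList] at h'
  have hlen := congrArg List.length h'
  have hwk : k < w.length := by omega
  cases hs : splitNl docstring.toList with
  | nil => exact absurd hs (splitNl_ne_nil docstring.toList)
  | cons p ps =>
    rw [hs] at hlen hw
    rw [List.map_cons, join_length, join_length, List.map_map] at hlen
    simp only [Function.comp_def, List.length_drop] at hlen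
    have hsum : ((ps.map (fun l => l.length - (l.length - k) + 1)).sum ≤ (ps.map (fun l => l.length + 1)).sum) :=
      List.sum_le_sum (fun l _ => by omega)
    rcases List.mem_cons.mp hw with rfl | hwps
    · omega
    · have hstrict : (ps.map (fun l => l.length - (l.length - k) + 1)).sum < (ps.map (fun l => l.length + 1)).sum :=
        List.sum_lt_sum _ _ (fun l _ => by omega) ⟨w, hwps, by omega⟩
      omega

-- ===== VERDICT (by name: the statement is the Claim_ definition above) =====
theorem outdent_lines_spec : Claim_unchanged_outdent_lines := by
  intro docstring spaces _ hnD
  exact unchanged_main docstring spaces hnD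

theorem outdent_lines_changed : Claim_changed_outdent_lines := by
  unfold Claim_changed_outdent_lines; decide

theorem outdent_lines_tight : Claim_exact_outdent_lines := by
  intro docstring spaces _ hD
  exact tight_main docstring spaces hD
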